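-- pv_equiv track=rewrite | github.com/robert405/WebMarkerDetector | ArucoDetector.py | calculateSmallFrameContour
-- ===== SOURCE A (Python) =====
-- def calculateSmallFrameContour(markerList):
--
--     allX = []
--     allY = []
--
--     for pos in markerList:
--
--         allX += [pos[0]]
--         allY += [pos[1]]
--
--     allX.sort()
--     allY.sort()
--
--     return (int(allX[1]), int(allY[1])), (int(allX[len(allX)-2]), int(allY[len(allY)-2]))
-- ===== SOURCE B (Python) =====
-- def calculateSmallFrameContour(markerList):
--     # One linear pass: keep the two smallest and two largest X and Y seen so far.
--     minX1 = minX2 = maxX1 = maxX2 = None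
--     minY1 = minY2 = maxY1 = maxY2 = None
--
--     for pos in markerList:
--         x = pos[0]
--         y = pos[1]
--
--         if minX1 is None or x < minX1:
--             minX2 = minX1
--             minX1 = x
--         elif minX2 is None or x < minX2:
--             minX2 = x
--
--         if maxX1 is None or x > maxX1:
--             maxX2 = maxX1
--             maxX1 = x
--         elif maxX2 is None or x > maxX2:
--             maxX2 = x
--
--         if minY1 is None or y < minY1:
--             minY2 = minY1
--             minY1 = y
--         elif minY2 is None or y < minY2:
--             minY2 = y
--
--         if maxY1 is None or y > maxY1:
--             maxY2 = maxY1
--             maxY1 = y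
--         elif maxY2 is None or y > maxY2:
--             maxY2 = y
--
--     return (int(minX2), int(minY2)), (int(maxX2), int(maxY2))
-- ===== Notes on version B (the rewrite author's own statement) =====
-- stated objective: alternative
-- what changed: Replaces collect-all/sort-both-lists/index with a single linear pass that tracks the two smallest and two largest X and Y values using <= / >= tie semantics matching the sorted indices.
import Mathlib
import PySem

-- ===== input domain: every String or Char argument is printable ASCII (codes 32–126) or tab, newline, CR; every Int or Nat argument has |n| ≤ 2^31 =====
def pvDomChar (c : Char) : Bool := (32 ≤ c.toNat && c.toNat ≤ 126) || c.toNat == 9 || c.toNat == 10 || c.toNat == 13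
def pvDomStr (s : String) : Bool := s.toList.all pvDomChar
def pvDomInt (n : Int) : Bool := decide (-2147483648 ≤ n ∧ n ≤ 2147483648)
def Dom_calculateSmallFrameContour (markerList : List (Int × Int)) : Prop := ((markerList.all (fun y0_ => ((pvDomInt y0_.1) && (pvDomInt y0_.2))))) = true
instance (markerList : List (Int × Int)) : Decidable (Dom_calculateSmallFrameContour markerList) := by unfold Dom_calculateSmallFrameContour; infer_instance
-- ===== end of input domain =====

-- B replaces collect-sort-index with ONE linear pass tracking the two smallest and two
-- largest X and Y (objective: alternative algorithm, selection instead of sorting).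

-- ===== PORT A =====
-- A: collect all X and all Y, sort each ascending, take index 1 and index len-2.
-- allX[1] raises IndexError when len < 2 (pyGet? = none there; excluded by Pre_, .getD 0 unreachable inside Pre_).
def calculateSmallFrameContour (markerList : List (Int × Int)) : (Int × Int) × (Int × Int) :=
  let allX := markerList.foldl (fun acc pos => acc ++ [pos.1]) []
  let allY := markerList.foldl (fun acc pos => acc ++ [pos.2]) []
  let sX := PySem.List.sorted allX (fun x => x) false
  let sY := PySem.List.sorted allY (fun x => x) false
  (((PySem.List.pyGet? sX 1).getD 0, (PySem.List.pyGet? sY 1).getD 0),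
   ((PySem.List.pyGet? sX ((sX.length : Int) - 2)).getD 0,
    (PySem.List.pyGet? sY ((sY.length : Int) - 2)).getD 0))

-- ===== PORT B =====
-- Source B's "if m1 is None or v < m1: m2 = m1; m1 = v elif m2 is None or v < m2: m2 = v"
def pvMinStep (s : Option Int × Option Int) (v : Int) : Option Int × Option Int :=
  match s with
  | (none, _) => (some v, none)
  | (some a, m2) =>
    if v < a then (some v, some a)
    else match m2 with
      | none => (some a, some v)
      | some b => if v < b then (some a, some v) else (some a, some b)

-- the same with > (two largest)
def pvMaxStep (s : Option Int × Option Int) (v : Int) : Option Int × Option Int :=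
  match s with
  | (none, _) => (some v, none)
  | (some a, m2) =>
    if a < v then (some v, some a)
    else match m2 with
      | none => (some a, some v)
      | some b => if b < v then (some a, some v) else (some a, some b)

-- B: one pass over markerList; int(None) (len < 2) raises in Python — excluded by Pre_ (.getD 0 unreachable inside Pre_).
def calculateSmallFrameContour_alt (markerList : List (Int × Int)) : (Int × Int) × (Int × Int) :=
  let st := markerList.foldl
    (fun st pos =>
      ((pvMinStep st.1.1 pos.1, pvMaxStep st.1.2 pos.1),
       (pvMinStep st.2.1 pos.2, pvMaxStep st.2.2 pos.2)))
    (((none, none), (none, none)), ((none, none), (none, none)))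
  ((st.1.1.2.getD 0, st.2.1.2.getD 0), (st.1.2.2.getD 0, st.2.2.2.getD 0))

-- ===== PRECONDITION & SPEC =====
-- A raises IndexError on lists of fewer than two points (allX[1]); B raises TypeError there (int(None)).
def Pre_calculateSmallFrameContour (markerList : List (Int × Int)) : Prop :=
  2 ≤ markerList.length
instance (markerList : List (Int × Int)) : Decidable (Pre_calculateSmallFrameContour markerList) := by
  unfold Pre_calculateSmallFrameContour; infer_instance
def pvWitness_calculateSmallFrameContour : (List (Int × Int)) := [(0, 3), (5, 1), (2, 2)]

def Spec_calculateSmallFrameContour (markerList : List (Int × Int)) (out : (Int × Int) × (Int × Int)) : Prop := out = calculateSmallFrameContour_alt markerList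
instance (markerList : List (Int × Int)) (out : (Int × Int) × (Int × Int)) : Decidable (Spec_calculateSmallFrameContour markerList out) := by unfold Spec_calculateSmallFrameContour; infer_instance

-- ===== CLAIM (what is proved, stated in full; the proofs are below) =====
def Claim_equal_calculateSmallFrameContour : Prop := ∀ (markerList : List (Int × Int)), Dom_calculateSmallFrameContour markerList → Pre_calculateSmallFrameContour markerList → Spec_calculateSmallFrameContour markerList (calculateSmallFrameContour markerList)

-- ===== LEMMAS AND PROOFS =====

-- first two elements of a list, as B's (min1, min2)-style option pair
def pvPair2 : List Int → Option Int × Option Int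
  | [] => (none, none)
  | [a] => (some a, none)
  | a :: b :: _ => (some a, some b)

-- A's append-loop builds the map
theorem pvFoldAppend (f : (Int × Int) → Int) :
    ∀ (xs : List (Int × Int)) (acc : List Int),
      xs.foldl (fun a p => a ++ [f p]) acc = acc ++ xs.map f := by
  intro xs
  induction xs with
  | nil => intro acc; simp
  | cons p t ih => intro acc; simp [List.foldl_cons, ih]

-- B's product-state fold splits into four independent folds over the X and Y projections
theorem pvFoldSplit :
    ∀ (xs : List (Int × Int)) (a b c d : Option Int × Option Int),
      xs.foldl
        (fun st pos =>
          ((pvMinStep st.1.1 pos.1, pvMaxStep st.1.2 pos.1),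
           (pvMinStep st.2.1 pos.2, pvMaxStep st.2.2 pos.2)))
        ((a, b), (c, d))
      = (((xs.map Prod.fst).foldl pvMinStep a, (xs.map Prod.fst).foldl pvMaxStep b),
         ((xs.map Prod.snd).foldl pvMinStep c, (xs.map Prod.snd).foldl pvMaxStep d)) := by
  intro xs
  induction xs with
  | nil => intro a b c d; simp
  | cons p t ih => intro a b c d; simp [List.foldl_cons, ih]

-- one step of B's min tracking = insertion into the (truncated) ascending insertion sort
theorem pvMinStepInsert (L : List Int) (v : Int) :
    pvMinStep (pvPair2 (L.take 2)) v
      = pvPair2 ((PySem.List.insertBy (fun a b => decide (a < b)) v L).take 2) := by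
  match L with
  | [] => simp [pvPair2, pvMinStep, PySem.List.insertBy]
  | [a] =>
    simp only [List.take, pvPair2, pvMinStep, PySem.List.insertBy]
    by_cases h : v < a <;> simp [h]
  | a :: b :: t =>
    simp only [List.take, pvPair2, pvMinStep, PySem.List.insertBy]
    by_cases h1 : v < a
    · simp [h1]
    · by_cases h2 : v < b <;> simp [h1, h2]

theorem pvMaxStepInsert (L : List Int) (v : Int) :
    pvMaxStep (pvPair2 (L.take 2)) v
      = pvPair2 ((PySem.List.insertBy (fun a b => decide (b < a)) v L).take 2) := by
  match L with
  | [] => simp [pvPair2, pvMaxStep, PySem.List.insertBy]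
  | [a] =>
    simp only [List.take, pvPair2, pvMaxStep, PySem.List.insertBy]
    by_cases h : a < v <;> simp [h]
  | a :: b :: t =>
    simp only [List.take, pvPair2, pvMaxStep, PySem.List.insertBy]
    by_cases h1 : a < v
    · simp [h1]
    · by_cases h2 : b < v <;> simp [h1, h2]

theorem pvMinFold :
    ∀ (vs L : List Int),
      vs.foldl pvMinStep (pvPair2 (L.take 2))
        = pvPair2 ((vs.foldl (fun acc x => PySem.List.insertBy (fun a b => decide (a < b)) x acc) L).take 2) := by
  intro vs
  induction vs with
  | nil => intro L; simp
  | cons v t ih =>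
    intro L
    simp only [List.foldl_cons, pvMinStepInsert L v]
    exact ih _

theorem pvMaxFold :
    ∀ (vs L : List Int),
      vs.foldl pvMaxStep (pvPair2 (L.take 2))
        = pvPair2 ((vs.foldl (fun acc x => PySem.List.insertBy (fun a b => decide (b < a)) x acc) L).take 2) := by
  intro vs
  induction vs with
  | nil => intro L; simp
  | cons v t ih =>
    intro L
    simp only [List.foldl_cons, pvMaxStepInsert L v]
    exact ih _

theorem pvMinFoldSorted (vs : List Int) :
    vs.foldl pvMinStep (none, none)
      = pvPair2 ((PySem.List.sorted vs (fun x => x) false).take 2) := by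
  have h := pvMinFold vs []
  simpa [pvPair2, PySem.List.sorted_eq_foldl_insertBy vs (fun x => x)] using h

theorem pvMaxFoldSorted (vs : List Int) :
    vs.foldl pvMaxStep (none, none)
      = pvPair2 ((PySem.List.sorted vs (fun x => x) true).take 2) := by
  have h := pvMaxFold vs []
  simpa [pvPair2, PySem.List.sorted_rev_eq_foldl_insertBy vs (fun x => x)] using h

-- descending sort is the reverse of the ascending sort (Int values, identity key)
theorem pvSortedRevEqReverse (vs : List Int) :
    PySem.List.sorted vs (fun x => x) true = (PySem.List.sorted vs (fun x => x) false).reverse := by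
  apply List.Perm.eq_of_pairwise (le := fun a b : Int => b ≤ a)
  · exact fun a b _ _ h1 h2 => le_antisymm h2 h1
  · exact PySem.List.sorted_pairwise_rev vs (fun x => x)
  · exact (List.pairwise_reverse).2 (PySem.List.sorted_pairwise vs (fun x => x))
  · exact ((PySem.List.sorted_perm vs (fun x => x) true).trans
      ((PySem.List.sorted_perm vs (fun x => x) false).symm)).trans
      (List.reverse_perm _).symm

-- with at least two elements, the option pair's second slot is the list's index-1 element
theorem pvPair2_snd (S : List Int) (h : 2 ≤ S.length) :
    (pvPair2 (S.take 2)).2 = PySem.List.pyGet? S 1 := by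
  match S, h with
  | a :: b :: t, _ =>
    have : PySem.List.pyGet? (a :: b :: t) ((1 : Nat) : Int) = (a :: b :: t)[1]? :=
      PySem.List.pyGet?_natCast _ 1
    simpa [pvPair2] using this.symm

theorem pvLenSub2 (S : List Int) (h : 2 ≤ S.length) :
    PySem.List.pyGet? S ((S.length : Int) - 2) = some S.reverse[1]! := by
  have h2 : ((S.length : Int) - 2) = ((S.length - 2 : Nat) : Int) := by omega
  have hl : S.length - 2 < S.length := by omega
  have hr : 1 < S.reverse.length := by simp; omega
  rw [h2, PySem.List.pyGet?_natCast, List.getElem?_eq_getElem hl,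
      getElem!_pos S.reverse 1 hr, List.getElem_reverse]
  congr 1

-- ===== VERDICT (by name: the statement is the Claim_ definition above) =====
theorem calculateSmallFrameContour_spec : Claim_equal_calculateSmallFrameContour := by
  intro markerList _ hpre
  unfold Spec_calculateSmallFrameContour calculateSmallFrameContour calculateSmallFrameContour_alt
  simp only [pvFoldAppend, pvFoldSplit, List.nil_append]
  set X := markerList.map Prod.fst with hX
  set Y := markerList.map Prod.snd with hY
  have hXl : 2 ≤ X.length := by simpa [hX] using hpre
  have hYl : 2 ≤ Y.length := by simpa [hY] using hpre
  have hsX : 2 ≤ (PySem.List.sorted X (fun x => x) false).length := by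
    rw [PySem.List.length_sorted]; exact hXl
  have hsY : 2 ≤ (PySem.List.sorted Y (fun x => x) false).length := by
    rw [PySem.List.length_sorted]; exact hYl
  rw [pvMinFoldSorted X, pvMinFoldSorted Y, pvMaxFoldSorted X, pvMaxFoldSorted Y,
      pvSortedRevEqReverse X, pvSortedRevEqReverse Y]
  have hrX : 2 ≤ (PySem.List.sorted X (fun x => x) false).reverse.length := by
    simpa using hsX
  have hrY : 2 ≤ (PySem.List.sorted Y (fun x => x) false).reverse.length := by
    simpa using hsY
  rw [pvPair2_snd _ hsX, pvPair2_snd _ hsY, pvPair2_snd _ hrX, pvPair2_snd _ hrY,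
      pvLenSub2 _ hsX, pvLenSub2 _ hsY]
  have e1 : PySem.List.pyGet? (PySem.List.sorted X (fun x => x) false).reverse 1
      = (PySem.List.sorted X (fun x => x) false).reverse[1]? := PySem.List.pyGet?_natCast _ 1
  have e2 : PySem.List.pyGet? (PySem.List.sorted Y (fun x => x) false).reverse 1
      = (PySem.List.sorted Y (fun x => x) false).reverse[1]? := PySem.List.pyGet?_natCast _ 1
  rw [e1, e2, List.getElem?_eq_getElem (by omega), List.getElem?_eq_getElem (by omega),
      getElem!_pos _ 1 (by omega), getElem!_pos _ 1 (by omega)]
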